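-- pv_equiv track=rewrite | github.com/raisedbywolves53/newport-leadgen | deliverables/financials/build_proforma.py | generate_month_labels
-- ===== SOURCE A (Python) =====
-- def generate_month_labels(num_months=60, start_year=2026, start_month=3):
--     """Generate calendar month labels: Mar 2026, Apr 2026, ..., Feb 2031."""
--     month_names = ["Jan", "Feb", "Mar", "Apr", "May", "Jun",
--                    "Jul", "Aug", "Sep", "Oct", "Nov", "Dec"]
--     labels = []
--     for i in range(num_months):
--         m = (start_month - 1 + i) % 12
--         y = start_year + (start_month - 1 + i) // 12
--         labels.append(f"{month_names[m]} {y}")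
--     return labels
-- ===== SOURCE B (Python) =====
-- def generate_month_labels(num_months=60, start_year=2026, start_month=3):
--     """Generate calendar month labels by carrying a running (month, year) state."""
--     month_names = ["Jan", "Feb", "Mar", "Apr", "May", "Jun",
--                    "Jul", "Aug", "Sep", "Oct", "Nov", "Dec"]
--     carry, m = divmod(start_month - 1, 12)
--     year = start_year + carry
--     labels = []
--     for _ in range(num_months):
--         labels.append(f"{month_names[m]} {year}")
--         m += 1
--         if m == 12:
--             m = 0
--             year += 1
--     return labels
-- ===== Notes on version B (the rewrite author's own statement) =====
-- stated objective: alternative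
-- what changed: B normalizes (month, year) once with divmod and then carries a running month/year state with a rollover branch, instead of recomputing month and year from the loop index with %12 and //12 on every iteration.
import Mathlib
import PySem

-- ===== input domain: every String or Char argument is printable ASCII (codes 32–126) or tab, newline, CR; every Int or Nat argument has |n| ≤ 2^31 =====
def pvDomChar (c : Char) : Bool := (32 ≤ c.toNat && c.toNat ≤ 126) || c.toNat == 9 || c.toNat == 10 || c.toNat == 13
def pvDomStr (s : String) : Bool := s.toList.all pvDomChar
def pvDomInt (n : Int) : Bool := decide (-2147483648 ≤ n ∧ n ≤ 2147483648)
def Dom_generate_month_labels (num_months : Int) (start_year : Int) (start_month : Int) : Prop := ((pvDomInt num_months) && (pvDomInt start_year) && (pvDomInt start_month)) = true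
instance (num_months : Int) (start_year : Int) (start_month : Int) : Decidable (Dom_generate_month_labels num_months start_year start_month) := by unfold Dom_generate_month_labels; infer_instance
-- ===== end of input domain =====

-- B carries a running (month, year) state normalized once with divmod, instead of
-- recomputing month/year from the loop index with %12 and //12 each iteration (alternative decomposition).


def pvMonthNames : List String :=
  ["Jan", "Feb", "Mar", "Apr", "May", "Jun", "Jul", "Aug", "Sep", "Oct", "Nov", "Dec"]

-- ===== PORT A =====
-- A: for i in range(num_months): m = (start_month-1+i) % 12; y = start_year + (start_month-1+i) // 12
def generate_month_labels (num_months : Int) (start_year : Int) (start_month : Int) : List String :=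
  (PySem.List.pyRange 0 num_months 1).foldl
    (fun labels i =>
      let m := PySem.Int.mod (start_month - 1 + i) 12
      let y := start_year + PySem.Int.floordiv (start_month - 1 + i) 12
      labels ++ [((PySem.List.pyGet? pvMonthNames m).getD "") ++ " " ++ PySem.Int.toStr y])
    []

-- ===== PORT B =====
-- B's loop: emit label for current (m, year), then advance m with a rollover branch.
def pvAltLoop (n : Nat) (m : Int) (year : Int) : List String :=
  match n with
  | 0 => []
  | Nat.succ n' =>
    (((PySem.List.pyGet? pvMonthNames m).getD "") ++ " " ++ PySem.Int.toStr year) ::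
      (if m + 1 = 12 then pvAltLoop n' 0 (year + 1) else pvAltLoop n' (m + 1) year)

def generate_month_labels_alt (num_months : Int) (start_year : Int) (start_month : Int) : List String :=
  let carry := PySem.Int.floordiv (start_month - 1) 12   -- divmod(start_month - 1, 12)
  let m := PySem.Int.mod (start_month - 1) 12
  pvAltLoop num_months.toNat m (start_year + carry)

-- ===== PRECONDITION & SPEC =====
def Spec_generate_month_labels (num_months : Int) (start_year : Int) (start_month : Int) (out : List String) : Prop := out = generate_month_labels_alt num_months start_year start_month
instance (num_months : Int) (start_year : Int) (start_month : Int) (out : List String) : Decidable (Spec_generate_month_labels num_months start_year start_month out) := by unfold Spec_generate_month_labels; infer_instance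

-- ===== CLAIM (what is proved, stated in full; the proofs are below) =====
def Claim_equal_generate_month_labels : Prop := ∀ (num_months : Int) (start_year : Int) (start_month : Int), Dom_generate_month_labels num_months start_year start_month → Spec_generate_month_labels num_months start_year start_month (generate_month_labels num_months start_year start_month)

-- ===== LEMMAS AND PROOFS =====

-- the label A produces for absolute month offset x (x = start_month - 1 + i)
def pvLab (start_year : Int) (x : Int) : String :=
  ((PySem.List.pyGet? pvMonthNames (PySem.Int.mod x 12)).getD "") ++ " " ++
    PySem.Int.toStr (start_year + PySem.Int.floordiv x 12)

theorem pvAltLoop_eq (n : Nat) : ∀ (s sy : Int),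
    pvAltLoop n (PySem.Int.mod s 12) (sy + PySem.Int.floordiv s 12) =
      (List.range n).map (fun k : Nat => pvLab sy (s + (k : Int))) := by
  induction n with
  | zero => intro s sy; simp [pvAltLoop]
  | succ n ih =>
    intro s sy
    have hm : PySem.Int.mod s 12 = s % 12 := PySem.Int.mod_eq_emod_of_pos (by norm_num)
    have hd : PySem.Int.floordiv s 12 = s / 12 := PySem.Int.floordiv_eq_ediv_of_pos (by norm_num)
    have hm1 : PySem.Int.mod (s + 1) 12 = (s + 1) % 12 := PySem.Int.mod_eq_emod_of_pos (by norm_num)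
    have hd1 : PySem.Int.floordiv (s + 1) 12 = (s + 1) / 12 := PySem.Int.floordiv_eq_ediv_of_pos (by norm_num)
    have hstep : (if PySem.Int.mod s 12 + 1 = 12 then
          pvAltLoop n 0 (sy + PySem.Int.floordiv s 12 + 1)
        else pvAltLoop n (PySem.Int.mod s 12 + 1) (sy + PySem.Int.floordiv s 12)) =
        pvAltLoop n (PySem.Int.mod (s + 1) 12) (sy + PySem.Int.floordiv (s + 1) 12) := by
      rw [hm, hd, hm1, hd1]
      by_cases h : s % 12 + 1 = 12
      · have h1 : (s + 1) % 12 = 0 := by omega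
        have h2 : (s + 1) / 12 = s / 12 + 1 := by omega
        simp [h, h1, h2, add_assoc]
      · have h1 : (s + 1) % 12 = s % 12 + 1 := by omega
        have h2 : (s + 1) / 12 = s / 12 := by omega
        simp [h, h1, h2]
    have hrange : List.range (n + 1) = 0 :: (List.range n).map Nat.succ :=
      List.range_succ_eq_map
    calc pvAltLoop (n + 1) (PySem.Int.mod s 12) (sy + PySem.Int.floordiv s 12)
        = pvLab sy s :: pvAltLoop n (PySem.Int.mod (s + 1) 12) (sy + PySem.Int.floordiv (s + 1) 12) := by
          rw [pvAltLoop, hstep]; rfl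
      _ = pvLab sy s :: (List.range n).map (fun k : Nat => pvLab sy (s + 1 + (k : Int))) := by
          rw [ih (s + 1) sy]
      _ = (List.range (n + 1)).map (fun k : Nat => pvLab sy (s + (k : Int))) := by
          rw [hrange]
          simp only [List.map_cons, List.map_map]
          congr 1
          · simp [pvLab]
          · apply List.map_congr_left
            intro k _
            simp only [Function.comp]
            congr 1
            push_cast
            ring

theorem portA_eq_map (num_months start_year start_month : Int) :
    generate_month_labels num_months start_year start_month =
      (List.range num_months.toNat).map
        (fun k : Nat => pvLab start_year (start_month - 1 + (k : Int))) := by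
  unfold generate_month_labels
  rw [PySem.List.foldl_append_singleton_eq_map, PySem.List.pyRange_one, List.nil_append,
    List.map_map]
  have h0 : num_months - 0 = num_months := by ring
  rw [h0]
  exact List.map_congr_left (fun k _ => by simp [pvLab])

theorem generate_month_labels_spec : Claim_equal_generate_month_labels := by
  intro num_months start_year start_month _
  unfold Spec_generate_month_labels generate_month_labels_alt
  rw [portA_eq_map, pvAltLoop_eq num_months.toNat (start_month - 1) start_year]
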